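-- pv_equiv track=rewrite | github.com/SAMKE-glitch/Daft_codes | sn1/substringCircular.py | solution
-- ===== SOURCE A (Python) =====
-- def solution(s: str) -> int:
--     n = len(s)
--     circular_s = s + s  # Concatenate the string with itself to handle circular substrings
--     substrings = set()
--
--     # Generate all circular substrings of original length `n`
--     for i in range(n):
--         for length in range(1, n + 1):
--             # Take substring of the required length starting from `i`
--             substrings.add(circular_s[i:i + length])
--
--     # Count unique substrings
--     return len(substrings)
-- ===== SOURCE B (Python) =====
-- def solution(s: str) -> int:
--     # Every circular substring of length 1..n is a nonempty prefix of one of the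
--     # n rotations of s.  Sort the rotations; then, as in suffix-array counting,
--     # each rotation contributes n minus its longest common prefix with the
--     # previous rotation new distinct prefixes.  No hash set is needed.
--     n = len(s)
--     t = s + s
--     rots = sorted(t[i:i + n] for i in range(n))
--     total = 0
--     prev = ""
--     for r in rots:
--         k = 0
--         while k < len(prev) and prev[k] == r[k]:
--             k += 1
--         total += n - k
--         prev = r
--     return total
-- ===== Notes on version B (the rewrite author's own statement) =====
-- stated objective: faster
-- what changed: B never enumerates the n^2 substrings into a hash set: it sorts the n rotations of s and, suffix-array style, sums n minus the longest common prefix with the predecessor, since the distinct circular substrings are exactly the distinct nonempty prefixes of the rotations.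
import Mathlib
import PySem

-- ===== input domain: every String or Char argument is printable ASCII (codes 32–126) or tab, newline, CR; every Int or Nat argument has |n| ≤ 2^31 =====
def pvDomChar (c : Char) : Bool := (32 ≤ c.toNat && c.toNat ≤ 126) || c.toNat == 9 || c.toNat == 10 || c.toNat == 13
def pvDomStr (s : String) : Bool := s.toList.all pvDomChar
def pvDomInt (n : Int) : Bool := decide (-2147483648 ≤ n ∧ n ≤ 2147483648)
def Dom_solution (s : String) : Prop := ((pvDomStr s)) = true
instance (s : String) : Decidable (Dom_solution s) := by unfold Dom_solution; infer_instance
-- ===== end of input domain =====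

-- B replaces A's hash-set enumeration of all n^2 circular substrings by suffix-array-style
-- counting: sort the n rotations and sum n minus the longest common prefix with the
-- predecessor (objective: a genuinely different algorithm).

-- ===== PORT A =====
def solution (s : String) : Int :=
  let cs := s.toList
  let n : Int := (cs.length : Int)
  let circular_s := cs ++ cs
  let substrings : PySem.Set (List Char) :=
    (PySem.List.pyRange 0 n 1).foldl (fun acc i =>
      (PySem.List.pyRange 1 (n + 1) 1).foldl (fun acc2 length =>
        PySem.Set.add acc2 (PySem.List.slice circular_s (some i) (some (i + length)))) acc)
      PySem.Set.empty
  PySem.Set.len substrings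

-- ===== PORT B =====
-- Source B's `k = 0; while k < len(prev) and prev[k] == r[k]: k += 1` as the common-prefix
-- scan; exact for the reachable states, where len(prev) ≤ len(r).
def lcpChars : List Char → List Char → Nat
  | p :: ps, c :: cs => if p = c then lcpChars ps cs + 1 else 0
  | _, _ => 0

def solution_alt (s : String) : Int :=
  let cs := s.toList
  let n : Int := (cs.length : Int)
  let t := cs ++ cs
  let rots := PySem.List.sorted
    ((PySem.List.pyRange 0 n 1).map (fun i => PySem.List.slice t (some i) (some (i + n))))
    (fun x => x) false
  (rots.foldl (fun (acc : Int × List Char) r =>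
      (acc.1 + (n - (lcpChars acc.2 r : Int)), r)) (0, [])).1

-- ===== PRECONDITION & SPEC =====
def Spec_solution (s : String) (out : Int) : Prop := out = solution_alt s
instance (s : String) (out : Int) : Decidable (Spec_solution s out) := by unfold Spec_solution; infer_instance

-- ===== CLAIM =====
def Claim_equal_solution : Prop := ∀ (s : String), Dom_solution s → Spec_solution s (solution s)

-- ===== LEMMAS AND PROOFS =====

-- rotation i of cs, and the list of nonempty prefixes of a word
def rotOf (cs : List Char) (i : Nat) : List Char := ((cs ++ cs).drop i).take cs.length
def nprefs (w : List Char) : List (List Char) :=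
  (List.range w.length).map (fun L => w.take (L + 1))

-- ---- lcpChars facts ----
theorem lcp_le_right (a b : List Char) : lcpChars a b ≤ b.length := by
  induction a generalizing b with
  | nil => simp [lcpChars]
  | cons x as ih =>
    cases b with
    | nil => simp [lcpChars]
    | cons y bs =>
      simp only [lcpChars]
      split_ifs
      · simpa using ih bs
      · simp

theorem take_lcp_eq (a b : List Char) :
    a.take (lcpChars a b) = b.take (lcpChars a b) := by
  induction a generalizing b with
  | nil => simp [lcpChars]
  | cons x as ih =>
    cases b with
    | nil => simp [lcpChars]
    | cons y bs =>
      simp only [lcpChars]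
      split_ifs with h
      · simp [h, List.take_succ_cons, ih bs]
      · simp

theorem take_eq_of_le_lcp (a b : List Char) (k : Nat) (hk : k ≤ lcpChars a b) :
    a.take k = b.take k := by
  have h1 : a.take k = (a.take (lcpChars a b)).take k := by
    rw [List.take_take, Nat.min_eq_left hk]
  have h2 : b.take k = (b.take (lcpChars a b)).take k := by
    rw [List.take_take, Nat.min_eq_left hk]
  rw [h1, h2, take_lcp_eq]

theorem le_lcp_of_take_eq (a b : List Char) (k : Nat)
    (h : a.take k = b.take k) (hk : k ≤ a.length) : k ≤ lcpChars a b := by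
  induction a generalizing b k with
  | nil => simp at hk; omega
  | cons x as ih =>
    cases k with
    | zero => exact Nat.zero_le _
    | succ m =>
      cases b with
      | nil => simp [List.take_succ_cons] at h
      | cons y bs =>
        simp only [List.take_succ_cons, List.cons.injEq] at h
        simp only [lcpChars, h.1, if_true]
        have := ih bs m h.2 (by simpa using hk)
        omega

-- ---- lex-order facts (the LinearOrder on List Char) ----
theorem nil_le_list (a : List Char) : ([] : List Char) ≤ a :=
  Std.not_lt.mp (List.not_lt_nil a)

theorem cons_le_nil_false (x : Char) (as : List Char) (h : x :: as ≤ ([] : List Char)) : False :=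
  Std.not_lt.mpr h (List.Lex.nil)

theorem head_le_of_cons_le (x y : Char) (as bs : List Char) (h : x :: as ≤ y :: bs) : x ≤ y := by
  by_contra hxy
  exact Std.not_lt.mpr h (List.Lex.rel (lt_of_not_ge hxy))

theorem tail_le_of_cons_le (x : Char) (as bs : List Char) (h : x :: as ≤ x :: bs) : as ≤ bs := by
  refine Std.not_lt.mp (fun hlt => Std.not_lt.mpr h ?_)
  exact List.cons_lt_cons_self.mpr hlt

-- for a ≤ b ≤ c, c's common prefix with a is no longer than with b
theorem lcp_mono_of_le (a b c : List Char) (hab : a ≤ b) (hbc : b ≤ c) :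
    lcpChars a c ≤ lcpChars b c := by
  induction a generalizing b c with
  | nil => simp [lcpChars]
  | cons x as ih =>
    cases b with
    | nil => exact absurd hab (fun h => cons_le_nil_false x as h)
    | cons y bs =>
      cases c with
      | nil => simp [lcpChars]
      | cons z cs =>
        simp only [lcpChars]
        by_cases hxz : x = z
        · have hxy : x ≤ y := head_le_of_cons_le x y as bs hab
          have hyz' : y ≤ z := head_le_of_cons_le y z bs cs hbc
          have hzy : z ≤ y := hxz ▸ hxy
          have hyz : y = z := le_antisymm hyz' hzy
          rw [if_pos hxz, if_pos hyz]
          have hx : x = y := hyz ▸ hxz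
          have h1 : as ≤ bs := tail_le_of_cons_le x as bs (hx ▸ hab)
          have h2 : bs ≤ cs := tail_le_of_cons_le y bs cs (hyz ▸ hbc)
          have := ih bs cs h1 h2
          omega
        · rw [if_neg hxz]
          exact Nat.zero_le _

-- ---- nprefs facts ----
theorem mem_nprefs (p w : List Char) : p ∈ nprefs w ↔ p ≠ [] ∧ p <+: w := by
  constructor
  · intro hp
    simp only [nprefs, List.mem_map, List.mem_range] at hp
    obtain ⟨L, hL, rfl⟩ := hp
    refine ⟨?_, List.take_prefix _ _⟩
    have : (w.take (L + 1)).length = L + 1 := by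
      rw [List.length_take]; omega
    intro h; rw [h] at this; simp at this
  · rintro ⟨hne, hpre⟩
    have hlen : p.length ≤ w.length := hpre.length_le
    have hpos : 0 < p.length := List.length_pos_iff.mpr hne
    have htake : w.take p.length = p := (List.prefix_iff_eq_take.mp hpre).symm
    simp only [nprefs, List.mem_map, List.mem_range]
    exact ⟨p.length - 1, by omega, by rw [Nat.sub_add_cancel hpos, htake]⟩

theorem nprefs_nodup (w : List Char) : (nprefs w).Nodup := by
  refine List.Nodup.map_on ?_ List.nodup_range
  intro x hx y hy hxy
  simp only [List.mem_range] at hx hy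
  have h1 : (w.take (x + 1)).length = x + 1 := by rw [List.length_take]; omega
  have h2 : (w.take (y + 1)).length = y + 1 := by rw [List.length_take]; omega
  rw [hxy, h2] at h1
  omega

theorem card_nprefs (w : List Char) : (nprefs w).toFinset.card = w.length := by
  rw [List.toFinset_card_of_nodup (nprefs_nodup w)]
  simp [nprefs]

-- the nonempty common prefixes of prev and r are the nonempty prefixes of r.take (lcp prev r)
theorem inter_nprefs (prev r : List Char) :
    (nprefs r).toFinset ∩ (nprefs prev).toFinset
      = (nprefs (r.take (lcpChars prev r))).toFinset := by
  ext p
  simp only [Finset.mem_inter, List.mem_toFinset, mem_nprefs]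
  constructor
  · rintro ⟨⟨hne, hr⟩, -, hprev⟩
    refine ⟨hne, ?_⟩
    have h1 : p = r.take p.length := List.prefix_iff_eq_take.mp hr
    have h2 : p = prev.take p.length := List.prefix_iff_eq_take.mp hprev
    have hlcp : p.length ≤ lcpChars prev r :=
      le_lcp_of_take_eq prev r p.length (by rw [← h1, ← h2]) hprev.length_le
    rw [List.prefix_iff_eq_take, List.take_take, Nat.min_eq_left hlcp]
    exact h1
  · rintro ⟨hne, hpre⟩
    have htr : r.take (lcpChars prev r) <+: r := List.take_prefix _ _
    have hpr : p <+: r := hpre.trans htr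
    have hlen : p.length ≤ lcpChars prev r := by
      have := hpre.length_le
      rw [List.length_take] at this
      omega
    have h1 : p = r.take p.length := List.prefix_iff_eq_take.mp hpr
    refine ⟨⟨hne, hpr⟩, hne, ?_⟩
    rw [List.prefix_iff_eq_take, take_eq_of_le_lcp prev r p.length hlen]
    exact h1

theorem card_nprefs_sdiff (prev r : List Char) :
    ((nprefs r).toFinset \ (nprefs prev).toFinset).card = r.length - lcpChars prev r := by
  have h := Finset.card_sdiff_add_card_inter (nprefs r).toFinset (nprefs prev).toFinset
  rw [inter_nprefs, card_nprefs, card_nprefs] at h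
  have hle : lcpChars prev r ≤ r.length := lcp_le_right prev r
  rw [List.length_take, Nat.min_eq_left hle] at h
  omega

-- partition of (A ∪ F) \ P when every common element of F and P already lies in A
theorem card_union_sdiff {α : Type} [DecidableEq α] (A F P : Finset α)
    (h : F ∩ P ⊆ A) : ((A ∪ F) \ P).card = (A \ P).card + (F \ A).card := by
  have hset : (A ∪ F) \ P = (A \ P) ∪ (F \ A) := by
    ext x
    simp only [Finset.mem_sdiff, Finset.mem_union]
    constructor
    · rintro ⟨hA | hF, hP⟩
      · exact Or.inl ⟨hA, hP⟩
      · by_cases hxA : x ∈ A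
        · exact Or.inl ⟨hxA, hP⟩
        · exact Or.inr ⟨hF, hxA⟩
    · rintro (⟨hA, hP⟩ | ⟨hF, hA⟩)
      · exact ⟨Or.inl hA, hP⟩
      · refine ⟨Or.inr hF, fun hP => hA ?_⟩
        exact h (Finset.mem_inter.mpr ⟨hF, hP⟩)
  rw [hset, Finset.card_union_of_disjoint]
  rw [Finset.disjoint_left]
  intro x hx hy
  rw [Finset.mem_sdiff] at hx hy
  exact hy.2 hx.1

-- the B loop counts the distinct nonempty prefixes not already prefixes of prev
theorem count_loop (n : Nat) (ws : List (List Char)) (prev : List Char) (t0 : Int)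
    (hlen : ∀ w ∈ ws, w.length = n) (hsort : ws.Pairwise (· ≤ ·))
    (hprev : ∀ w ∈ ws, prev ≤ w) :
    (ws.foldl (fun (acc : Int × List Char) r =>
        (acc.1 + ((n : Int) - (lcpChars acc.2 r : Int)), r)) (t0, prev)).1
      = t0 + (((ws.flatMap nprefs).toFinset \ (nprefs prev).toFinset).card : Int) := by
  induction ws generalizing prev t0 with
  | nil => simp
  | cons r ws ih =>
    simp only [List.foldl_cons, List.flatMap_cons, List.toFinset_append]
    have h1 : ∀ w ∈ ws, w.length = n := fun w hw => hlen w (List.mem_cons_of_mem r hw)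
    have h3 : ∀ w ∈ ws, r ≤ w := fun w hw => List.rel_of_pairwise_cons hsort hw
    rw [ih r _ h1 hsort.of_cons h3]
    have hrn : r.length = n := hlen r List.mem_cons_self
    have hsub : (ws.flatMap nprefs).toFinset ∩ (nprefs prev).toFinset ⊆ (nprefs r).toFinset := by
      intro p hp
      rw [Finset.mem_inter, List.mem_toFinset, List.mem_toFinset, List.mem_flatMap] at hp
      obtain ⟨⟨u, hu, hpu⟩, hpprev⟩ := hp
      rw [mem_nprefs] at hpu hpprev
      rw [List.mem_toFinset, mem_nprefs]
      obtain ⟨hne, hpu⟩ := hpu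
      obtain ⟨-, hpprev⟩ := hpprev
      refine ⟨hne, ?_⟩
      have h1 : p = u.take p.length := List.prefix_iff_eq_take.mp hpu
      have h2 : p = prev.take p.length := List.prefix_iff_eq_take.mp hpprev
      have hlcp : p.length ≤ lcpChars prev u :=
        le_lcp_of_take_eq prev u p.length (by rw [← h1, ← h2]) hpprev.length_le
      have hmono : lcpChars prev u ≤ lcpChars r u :=
        lcp_mono_of_le prev r u (hprev r List.mem_cons_self) (h3 u hu)
      rw [List.prefix_iff_eq_take, take_eq_of_le_lcp r u p.length (by omega)]
      exact h1
    rw [card_union_sdiff _ _ _ hsub]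
    have hcard := card_nprefs_sdiff prev r
    rw [hrn] at hcard
    have hlcp : lcpChars prev r ≤ n := hrn ▸ lcp_le_right prev r
    rw [hcard]
    push_cast [Nat.cast_sub hlcp]
    ring

-- ---- A-side reduction (set of all slices as a flatMap) ----
theorem foldl_update_eq_update_flatMap {α β : Type} [BEq α] (is : List β) (g : β → List α)
    (s : PySem.Set α) :
    is.foldl (fun acc i => PySem.Set.update acc (g i)) s
      = PySem.Set.update s (is.flatMap g) := by
  induction is generalizing s with
  | nil => simp [PySem.Set.update]
  | cons i is ih => simp [List.foldl_cons, ih, List.flatMap_cons, PySem.Set.update_append]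

theorem len_ofList_eq_card (xs : List (List Char)) :
    (PySem.Set.ofList xs).length = xs.toFinset.card := by
  have hnd := PySem.Set.nodup_ofList (xs := xs)
  have hmem : (PySem.Set.ofList xs).toFinset = xs.toFinset := by
    ext y; simp [PySem.Set.mem_ofList]
  rw [← hmem, List.toFinset_card_of_nodup hnd]

-- range(1, n+1) as a shifted Nat range
theorem pyRange_one_shift (n : Nat) :
    PySem.List.pyRange 1 ((n : Int) + 1) 1 = (List.range n).map (fun k => ((k + 1 : Nat) : Int)) := by
  induction n with
  | zero => decide
  | succ m ih =>
    rw [show ((m + 1 : Nat) : Int) + 1 = ((m : Int) + 1) + 1 by push_cast; ring,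
      PySem.List.pyRange_one_succ_right (by omega), ih, List.range_succ, List.map_append]
    push_cast
    simp

theorem rot_length (cs : List Char) (j : Nat) (hj : j < cs.length) :
    (rotOf cs j).length = cs.length := by
  simp only [rotOf, List.length_take, List.length_drop, List.length_append]
  omega

-- A's inner loop over lengths produces exactly the nonempty prefixes of rotation j
theorem inner_eq (cs : List Char) (j : Nat) (hj : j < cs.length) :
    (PySem.List.pyRange 1 ((cs.length : Int) + 1) 1).map
        (fun L => PySem.List.slice (cs ++ cs) (some (j : Int)) (some ((j : Int) + L)))
      = nprefs (rotOf cs j) := by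
  rw [pyRange_one_shift, List.map_map, nprefs, rot_length cs j hj]
  refine List.map_congr_left ?_
  intro k hk
  rw [List.mem_range] at hk
  simp only [Function.comp_apply, PySem.List.slice_natCast_add]
  rw [rotOf, List.take_take, Nat.min_eq_left (by omega)]

-- the unsorted rotation list built by B equals the Nat-indexed rotations
theorem rots_eq (cs : List Char) :
    (PySem.List.pyRange 0 ((cs.length : Int)) 1).map
        (fun i => PySem.List.slice (cs ++ cs) (some i) (some (i + (cs.length : Int))))
      = (List.range cs.length).map (rotOf cs) := by
  rw [PySem.List.pyRange_zero_natCast, List.map_map]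
  refine List.map_congr_left ?_
  intro j hj
  simp only [Function.comp_apply, PySem.List.slice_natCast_add]
  rfl

-- A's flatMap of slices = flatMap of prefixes of the rotations
theorem A_flat_eq (cs : List Char) :
    (PySem.List.pyRange 0 ((cs.length : Int)) 1).flatMap
        (fun i => (PySem.List.pyRange 1 ((cs.length : Int) + 1) 1).map
          (fun L => PySem.List.slice (cs ++ cs) (some i) (some (i + L))))
      = ((List.range cs.length).map (rotOf cs)).flatMap nprefs := by
  rw [List.flatMap_map, PySem.List.pyRange_zero_natCast, List.flatMap_map]
  refine List.flatMap_congr ?_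
  intro j hj
  rw [List.mem_range] at hj
  exact inner_eq cs j hj

theorem solution_eq (s : String) : solution s = solution_alt s := by
  simp only [solution, solution_alt]
  generalize s.toList = cs
  -- A's side: the set is ofList of the flatMap of all slices
  have hfold :
      (fun (acc : PySem.Set (List Char)) (i : Int) =>
        (PySem.List.pyRange 1 ((cs.length : Int) + 1) 1).foldl (fun acc2 length =>
          PySem.Set.add acc2 (PySem.List.slice (cs ++ cs) (some i) (some (i + length)))) acc)
      = (fun acc i => PySem.Set.update acc
          ((PySem.List.pyRange 1 ((cs.length : Int) + 1) 1).map
            (fun length => PySem.List.slice (cs ++ cs) (some i) (some (i + length))))) := by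
    funext acc i
    exact (PySem.Set.update_map_eq_foldl_add _ _ acc).symm
  rw [hfold, foldl_update_eq_update_flatMap,
    show (PySem.Set.empty : PySem.Set (List Char)) = [] from rfl,
    PySem.Set.update_nil_left]
  simp only [PySem.Set.len]
  rw [len_ofList_eq_card, A_flat_eq]
  -- B's side: the sorted rotations, counted by the lcp loop
  rw [rots_eq]
  set rots := (List.range cs.length).map (rotOf cs) with hrots
  have hd : (fun (a b : List Char) => a.decidableLT b)
      = (LinearOrder.toDecidableLT : DecidableLT (List Char)) :=
    funext fun a => funext fun b => Subsingleton.elim _ _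
  have hS : @PySem.List.sorted (List Char) (List Char) List.instLT (fun a b => a.decidableLT b)
        rots (fun x => x) false
      = @PySem.List.sorted (List Char) (List Char) List.instLinearOrder.toLT
        LinearOrder.toDecidableLT rots (fun x => x) false := by
    rw [hd]
  rw [hS]
  have hcl := count_loop cs.length
    (@PySem.List.sorted (List Char) (List Char) List.instLinearOrder.toLT
      LinearOrder.toDecidableLT rots (fun x => x) false) [] 0
    (by
      intro w hw
      rw [@PySem.List.mem_sorted (List Char) (List Char) List.instLinearOrder.toLT
        LinearOrder.toDecidableLT rots (fun x => x) false w, hrots, List.mem_map] at hw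
      obtain ⟨j, hj, rfl⟩ := hw
      rw [List.mem_range] at hj
      exact rot_length cs j hj)
    (PySem.List.sorted_pairwise rots (fun x => x))
    (fun w _ => nil_le_list w)
  rw [hcl]
  have hperm :
      (@PySem.List.sorted (List Char) (List Char) List.instLinearOrder.toLT
        LinearOrder.toDecidableLT rots (fun x => x) false).Perm rots :=
    @PySem.List.sorted_perm (List Char) (List Char) List.instLinearOrder.toLT
      LinearOrder.toDecidableLT rots (fun x => x) false
  have hflat :
      ((@PySem.List.sorted (List Char) (List Char) List.instLinearOrder.toLT
        LinearOrder.toDecidableLT rots (fun x => x) false).flatMap nprefs).toFinset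
      = (rots.flatMap nprefs).toFinset :=
    List.toFinset_eq_of_perm _ _ (hperm.flatMap (fun a _ => List.Perm.refl _))
  rw [hflat]
  simp [nprefs]

-- ===== VERDICT =====
theorem solution_spec : Claim_equal_solution := by
  intro s _
  exact solution_eq s
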